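-- pv_equiv track=rewrite | github.com/Carlosmtp/proyecto-ada | solucion1.py | ordenarEscena
-- ===== SOURCE A (Python) =====
-- def ordenarEscena(escena,grandezas):
--     grandeza=0
--     for i in range(3):
--         grandeza+=grandezas[escena[i]]
--     for i in range(2):
--         for j in range(2):
--             if grandezas[escena[j]]>grandezas[escena[j+1]]:
--                 aux=escena[j]
--                 escena[j]=escena[j+1]
--                 escena[j+1]=aux
--     return escena, grandeza
-- ===== SOURCE B (Python) =====
-- def ordenarEscena(escena, grandezas):
--     grandeza = sum(grandezas[e] for e in escena[:3])
--     escena[:3] = sorted(escena[:3], key=lambda e: grandezas[e])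
--     return escena, grandeza
-- ===== Notes on version B (the rewrite author's own statement) =====
-- stated objective: simpler
-- what changed: Replaces A's two hand-written bubble-sort passes (four conditional adjacent swaps) over the first three elements by one stable library sort of escena[:3] and the index loop that accumulates the total by a generator sum; both mutate escena in place the same way.
import Mathlib
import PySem

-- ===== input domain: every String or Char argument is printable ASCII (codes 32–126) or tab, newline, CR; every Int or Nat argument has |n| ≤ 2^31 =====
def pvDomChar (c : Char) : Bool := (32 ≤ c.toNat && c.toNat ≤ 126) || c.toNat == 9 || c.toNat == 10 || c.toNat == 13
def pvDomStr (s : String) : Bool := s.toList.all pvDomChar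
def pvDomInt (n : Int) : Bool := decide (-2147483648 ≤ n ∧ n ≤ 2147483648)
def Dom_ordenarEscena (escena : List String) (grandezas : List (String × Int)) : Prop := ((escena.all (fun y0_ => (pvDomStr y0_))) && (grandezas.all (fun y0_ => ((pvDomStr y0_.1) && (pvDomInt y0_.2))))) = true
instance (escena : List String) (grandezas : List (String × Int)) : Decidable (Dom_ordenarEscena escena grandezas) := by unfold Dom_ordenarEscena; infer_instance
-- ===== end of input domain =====

-- B replaces A's two hand-written bubble-sort passes by one library sort of the first
-- three elements and a generator-sum (objective: simpler/idiomatic).  Both Pythons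
-- mutate `escena` in place the same way; the theorems below are about the return value.

-- ===== PORT A =====
-- dict lookup grandezas[s] (first match; default never reached under Pre_)
def pvLookA (grandezas : List (String × Int)) (s : String) : Int :=
  (List.lookup s grandezas).getD 0

-- escena[i] for the nonnegative indices A uses (in range under Pre_)
def pvElA (es : List String) (i : Nat) : String := es.getD i ""

-- body of the inner 'for j in range(2)': conditional adjacent swap
def pvSwapStep (grandezas : List (String × Int)) (es : List String) (j : Nat) : List String :=
  if pvLookA grandezas (pvElA es j) > pvLookA grandezas (pvElA es (j + 1)) then
    (es.set j (pvElA es (j + 1))).set (j + 1) (pvElA es j)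
  else es

def ordenarEscena (escena : List String) (grandezas : List (String × Int)) : List String × Int :=
  let grandeza := (List.range 3).foldl (fun acc i => acc + pvLookA grandezas (pvElA escena i)) 0
  let es := (List.range 2).foldl (fun es _i => (List.range 2).foldl (pvSwapStep grandezas) es) escena
  (es, grandeza)

-- ===== PORT B =====
-- dict lookup grandezas[e] (first match; default never reached under Pre_)
def pvLookB (grandezas : List (String × Int)) (e : String) : Int :=
  (List.lookup e grandezas).getD 0

def ordenarEscena_alt (escena : List String) (grandezas : List (String × Int)) : List String × Int :=
  let first3 := PySem.List.slice escena none (some 3)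
  let grandeza := (first3.map (fun e => pvLookB grandezas e)).sum
  (PySem.List.sorted first3 (fun e => pvLookB grandezas e) ++ PySem.List.slice escena (some 3) none, grandeza)

-- ===== PRECONDITION & SPEC =====
-- Pre_: A indexes escena[0..2] and looks each of them up in grandezas; otherwise it
-- raises IndexError/KeyError.
def Pre_ordenarEscena (escena : List String) (grandezas : List (String × Int)) : Prop :=
  3 ≤ escena.length ∧ (escena.take 3).all (fun s => (List.lookup s grandezas).isSome) = true
instance (escena : List String) (grandezas : List (String × Int)) : Decidable (Pre_ordenarEscena escena grandezas) := by unfold Pre_ordenarEscena; infer_instance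

def pvWitness_ordenarEscena : List String × (List (String × Int)) :=
  (["b", "a", "c"], [("a", 2), ("b", 5), ("c", 1)])

def Spec_ordenarEscena (escena : List String) (grandezas : List (String × Int)) (out : List String × Int) : Prop := out = ordenarEscena_alt escena grandezas
instance (escena : List String) (grandezas : List (String × Int)) (out : List String × Int) : Decidable (Spec_ordenarEscena escena grandezas out) := by unfold Spec_ordenarEscena; infer_instance

-- ===== CLAIM (what is proved, stated in full; the proofs are below) =====
def Claim_equal_ordenarEscena : Prop := ∀ (escena : List String) (grandezas : List (String × Int)), Dom_ordenarEscena escena grandezas → Pre_ordenarEscena escena grandezas → Spec_ordenarEscena escena grandezas (ordenarEscena escena grandezas)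

-- ===== LEMMAS AND PROOFS =====

-- A's two bubble passes over the first three slots compute exactly Python's stable
-- sort of [u, v, w] by the looked-up size, leaving the tail untouched.
theorem bubble3 (g : List (String × Int)) (u v w : String) (t : List String) :
    (List.range 2).foldl (fun es _ => (List.range 2).foldl (pvSwapStep g) es) (u :: v :: w :: t)
    = PySem.List.sorted [u, v, w] (fun s => pvLookA g s) ++ t := by
  by_cases h1 : pvLookA g v < pvLookA g u <;>
  by_cases h2 : pvLookA g w < pvLookA g v <;>
  by_cases h3 : pvLookA g w < pvLookA g u <;>
  simp [List.range_succ, pvSwapStep, pvElA, PySem.List.sorted_eq_foldl_insertBy,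
    PySem.List.insertBy, h1, h2, h3] <;>
  (try split_ifs) <;> intros <;> (try simp_all) <;> (exfalso; omega)

-- ===== VERDICT (by name: the statement is the Claim_ definition above) =====
theorem ordenarEscena_spec : Claim_equal_ordenarEscena := by
  intro escena grandezas _ hpre
  obtain ⟨hlen, hkeys⟩ := hpre
  match escena with
  | [] => simp at hlen
  | [_] => simp at hlen
  | [_, _] => simp at hlen
  | a :: b :: c :: rest =>
    have hsl1 : PySem.List.slice (a :: b :: c :: rest) none (some 3) = [a, b, c] := by
      simp [PySem.List.slice, PySem.List.clampIdx]
    have hsl2 : PySem.List.slice (a :: b :: c :: rest) (some 3) none = rest := by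
      simp [PySem.List.slice, PySem.List.clampIdx]
    unfold Spec_ordenarEscena ordenarEscena ordenarEscena_alt
    simp only [hsl1, hsl2, bubble3]
    simp [List.range_succ, pvElA, pvLookA, pvLookB, Prod.ext_iff]
    omega
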